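-- pv_equiv track=rewrite | github.com/Dar125/CECS-Network | agents/performance_analyzer.py | _extract_structured_issues
-- ===== SOURCE A (Python) =====
-- from typing import Dict, List, Any
--
-- def _extract_structured_issues(analysis_text: str) -> List[Dict[str, str]]:
--     """Extract structured issues from analysis text"""
--     issues = []
--     lines = analysis_text.split('\n')
--
--     i = 0
--     while i < len(lines):
--         if lines[i].strip().startswith("ISSUE:"):
--             issue = {"name": lines[i].replace("ISSUE:", "").strip()}
--
--             # Look for other fields
--             j = i + 1
--             while j < len(lines) and not lines[j].strip().startswith("ISSUE:"):
--                 line = lines[j].strip()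
--                 if line.startswith("SEVERITY:"):
--                     issue["severity"] = line.replace("SEVERITY:", "").strip()
--                 elif line.startswith("LOCATION:"):
--                     issue["location"] = line.replace("LOCATION:", "").strip()
--                 elif line.startswith("COMPLEXITY:"):
--                     issue["complexity"] = line.replace("COMPLEXITY:", "").strip()
--                 elif line.startswith("IMPACT:"):
--                     issue["impact"] = line.replace("IMPACT:", "").strip()
--                 elif line.startswith("SOLUTION:"):
--                     issue["solution"] = line.replace("SOLUTION:", "").strip()
--                 j += 1
--
--             issues.append(issue)
--             i = j
--         else:
--             i += 1
--
--     return issues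
-- ===== SOURCE B (Python) =====
-- FIELD_PREFIXES = [
--     ("severity", "SEVERITY:"),
--     ("location", "LOCATION:"),
--     ("complexity", "COMPLEXITY:"),
--     ("impact", "IMPACT:"),
--     ("solution", "SOLUTION:"),
-- ]
--
-- def _extract_structured_issues(analysis_text: str):
--     """Single flat pass: keep the issue currently being built; flush it when a new ISSUE starts."""
--     issues = []
--     current = None
--     for line in analysis_text.split('\n'):
--         stripped = line.strip()
--         if stripped.startswith("ISSUE:"):
--             if current is not None:
--                 issues.append(current)
--             current = {"name": line.replace("ISSUE:", "").strip()}
--         elif current is not None: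
--             for key, prefix in FIELD_PREFIXES:
--                 if stripped.startswith(prefix):
--                     current[key] = stripped.replace(prefix, "").strip()
--                     break
--     if current is not None:
--         issues.append(current)
--     return issues
-- ===== Notes on version B (the rewrite author's own statement) =====
-- stated objective: simpler
-- what changed: Replaced A's nested while-loops with index jumping (i/j, inner scan per ISSUE block) by a single flat pass over the lines keeping the issue currently under construction, with the field prefixes in a small table instead of an elif chain.
import Mathlib
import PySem

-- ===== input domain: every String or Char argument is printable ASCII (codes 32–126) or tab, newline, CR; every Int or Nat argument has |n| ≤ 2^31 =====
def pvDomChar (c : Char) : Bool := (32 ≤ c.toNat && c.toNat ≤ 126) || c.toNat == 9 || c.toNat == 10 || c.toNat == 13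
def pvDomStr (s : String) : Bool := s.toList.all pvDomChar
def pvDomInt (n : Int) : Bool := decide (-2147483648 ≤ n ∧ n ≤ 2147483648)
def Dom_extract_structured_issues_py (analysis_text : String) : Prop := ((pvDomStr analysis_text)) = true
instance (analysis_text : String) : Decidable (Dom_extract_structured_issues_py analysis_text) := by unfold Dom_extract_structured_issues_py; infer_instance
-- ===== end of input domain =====

-- B is a single flat pass keeping the issue currently being built (objective: simpler), replacing
-- A's nested scan with index jumping; return values proved equal on every input.

-- ===== PORT A =====
-- elif chain of A's inner loop, applied to the already-stripped line
def pvAUpd (issue : PySem.Dict String String) (line : String) : PySem.Dict String String :=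
  if PySem.Str.startswith line "SEVERITY:" then
    issue.insert "severity" (PySem.Str.strip (PySem.Str.replace line "SEVERITY:" ""))
  else if PySem.Str.startswith line "LOCATION:" then
    issue.insert "location" (PySem.Str.strip (PySem.Str.replace line "LOCATION:" ""))
  else if PySem.Str.startswith line "COMPLEXITY:" then
    issue.insert "complexity" (PySem.Str.strip (PySem.Str.replace line "COMPLEXITY:" ""))
  else if PySem.Str.startswith line "IMPACT:" then
    issue.insert "impact" (PySem.Str.strip (PySem.Str.replace line "IMPACT:" ""))
  else if PySem.Str.startswith line "SOLUTION:" then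
    issue.insert "solution" (PySem.Str.strip (PySem.Str.replace line "SOLUTION:" ""))
  else issue

-- A's inner `while j < len(lines) and not …ISSUE:` loop: consumes lines, returns the
-- updated issue and the remaining suffix (the lines from j onwards)
def pvAInner (issue : PySem.Dict String String) : List String → PySem.Dict String String × List String
  | [] => (issue, [])
  | l :: rest =>
    if PySem.Str.startswith (PySem.Str.strip l) "ISSUE:" then (issue, l :: rest)
    else pvAInner (pvAUpd issue (PySem.Str.strip l)) rest

theorem pvAInner_len (issue : PySem.Dict String String) (xs : List String) :
    (pvAInner issue xs).2.length ≤ xs.length := by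
  induction xs generalizing issue with
  | nil => simp [pvAInner]
  | cons l rest ih =>
    simp only [pvAInner]
    split
    · simp
    · exact le_trans (ih _) (Nat.le_succ _)

-- A's outer `while i < len(lines)` loop over the suffix of lines starting at i
def pvAOuter : List String → List (PySem.Dict String String)
  | [] => []
  | l :: rest =>
    if PySem.Str.startswith (PySem.Str.strip l) "ISSUE:" then
      let p := pvAInner (PySem.Dict.ofList [("name", PySem.Str.strip (PySem.Str.replace l "ISSUE:" ""))]) rest
      p.1 :: pvAOuter p.2
    else pvAOuter rest
termination_by xs => xs.length
decreasing_by
  · exact Nat.lt_succ_of_le (pvAInner_len _ _)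
  · simp

-- sep "\n" ≠ "", so split? is always some; .getD [] only discharges the Option
def extract_structured_issues_py (analysis_text : String) : List (List (String × String)) :=
  (pvAOuter ((PySem.Str.split? analysis_text "\n").getD [])).map PySem.Dict.items

-- ===== PORT B =====
def pvFieldPrefixes : List (String × String) :=
  [("severity", "SEVERITY:"), ("location", "LOCATION:"), ("complexity", "COMPLEXITY:"),
   ("impact", "IMPACT:"), ("solution", "SOLUTION:")]

-- B's body of the `elif current is not None:` branch: first matching prefix from the table
def pvBUpd (cur : PySem.Dict String String) (stripped : String) : PySem.Dict String String :=
  match pvFieldPrefixes.find? (fun kp => PySem.Str.startswith stripped kp.2) with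
  | some (key, pfx) => cur.insert key (PySem.Str.strip (PySem.Str.replace stripped pfx ""))
  | none => cur

-- B's loop step over one line, state = (issues so far, issue being built)
def pvBStep (st : List (PySem.Dict String String) × Option (PySem.Dict String String))
    (line : String) : List (PySem.Dict String String) × Option (PySem.Dict String String) :=
  let stripped := PySem.Str.strip line
  if PySem.Str.startswith stripped "ISSUE:" then
    ((match st.2 with | some cur => st.1 ++ [cur] | none => st.1),
     some (PySem.Dict.ofList [("name", PySem.Str.strip (PySem.Str.replace line "ISSUE:" ""))]))
  else
    match st.2 with
    | some cur => (st.1, some (pvBUpd cur stripped))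
    | none => st

def extract_structured_issues_py_alt (analysis_text : String) : List (List (String × String)) :=
  let st := ((PySem.Str.split? analysis_text "\n").getD []).foldl pvBStep ([], none)
  (match st.2 with | some cur => st.1 ++ [cur] | none => st.1).map PySem.Dict.items

-- ===== PRECONDITION & SPEC =====
def Spec_extract_structured_issues_py (analysis_text : String) (out : List (List (String × String))) : Prop := out = extract_structured_issues_py_alt analysis_text
instance (analysis_text : String) (out : List (List (String × String))) : Decidable (Spec_extract_structured_issues_py analysis_text out) := by unfold Spec_extract_structured_issues_py; infer_instance

-- ===== CLAIM (what is proved, stated in full; the proofs are below) =====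
def Claim_equal_extract_structured_issues_py : Prop := ∀ (analysis_text : String), Dom_extract_structured_issues_py analysis_text → Spec_extract_structured_issues_py analysis_text (extract_structured_issues_py analysis_text)

-- ===== LEMMAS AND PROOFS =====

theorem pvUpd_eq (d : PySem.Dict String String) (s : String) : pvBUpd d s = pvAUpd d s := by
  simp only [pvBUpd, pvFieldPrefixes, pvAUpd, List.find?]
  repeat' split <;> try simp_all
  all_goals intro hS
  all_goals simp_all

-- the two intertwined loop invariants, proved together by induction on the lines
theorem pvLoop_eq (xs : List String) :
    (∀ acc d, (xs.foldl pvBStep (acc, some d)).1 ++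
        ((xs.foldl pvBStep (acc, some d)).2.elim [] ([·])) =
      acc ++ (pvAInner d xs).1 :: pvAOuter (pvAInner d xs).2) ∧
    (∀ acc, (xs.foldl pvBStep (acc, none)).1 ++
        ((xs.foldl pvBStep (acc, none)).2.elim [] ([·])) =
      acc ++ pvAOuter xs) := by
  induction xs with
  | nil => simp [pvAInner, pvAOuter]
  | cons l rest ih =>
    constructor
    · intro acc d
      by_cases h : PySem.Str.startswith (PySem.Str.strip l) "ISSUE:"
      · rw [pvAOuter.eq_def]
        simp only [List.foldl_cons, pvBStep, pvAInner, h, if_pos]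
        rw [ih.1]
        simp
      · simp only [List.foldl_cons, pvBStep, pvAInner, h, Bool.false_eq_true, if_false]
        rw [ih.1, pvUpd_eq]
    · intro acc
      by_cases h : PySem.Str.startswith (PySem.Str.strip l) "ISSUE:"
      · rw [pvAOuter.eq_def]
        simp only [List.foldl_cons, pvBStep, h, if_pos]
        rw [ih.1]
      · rw [pvAOuter.eq_def]
        simp only [List.foldl_cons, pvBStep, h, Bool.false_eq_true, if_false]
        exact ih.2 acc

-- ===== VERDICT (by name: the statement is the Claim_ definition above) =====
theorem extract_structured_issues_py_spec : Claim_equal_extract_structured_issues_py := by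
  intro s _
  unfold Spec_extract_structured_issues_py extract_structured_issues_py extract_structured_issues_py_alt
  have h := (pvLoop_eq ((PySem.Str.split? s "\n").getD [])).2 []
  cases hst : (((PySem.Str.split? s "\n").getD []).foldl pvBStep ([], none)).2 <;>
    simp [hst] at h ⊢ <;> simp [← h]
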